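-- pv_equiv track=rewrite | github.com/jkodner05/LIN220_Spring2021 | hw4/clustering.py | get_indexdict
-- ===== SOURCE A (Python) =====
-- LEFT = "<LEFT>"
--
-- RIGHT = "<RIGHT>"
--
-- def get_indexdict(words):
--     """Associates each word type with an index in the context vector"""
--     indexdict = {}
--     index = 0
--     for word in words:
--         if left(word) not in indexdict:
--             indexdict[left(word)] = index
--             index += 1
--         if right(word) not in indexdict:
--             indexdict[right(word)] = index
--             index += 1
--     return indexdict
--
-- def left(word):
--     """This function annotates words as left context"""
--     return LEFT+word
--
-- def right(word):
--     """This function annotates words as right context"""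
--     return RIGHT+word
-- ===== SOURCE B (Python) =====
-- LEFT = "<LEFT>"
--
-- RIGHT = "<RIGHT>"
--
-- def left(word):
--     """This function annotates words as left context"""
--     return LEFT+word
--
-- def right(word):
--     """This function annotates words as right context"""
--     return RIGHT+word
--
-- def get_indexdict(words):
--     """Associates each word type with an index in the context vector"""
--     # record, back to front, the first position of every key in the flat key stream
--     flat = [key for word in words for key in (left(word), right(word))]
--     firstpos = {}
--     for pos, key in reversed(list(enumerate(flat))):
--         firstpos[key] = pos
--     # rank the distinct keys by first position: that IS the first-seen order
--     ranked = sorted(firstpos, key=lambda k: firstpos[k])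
--     return {k: i for i, k in enumerate(ranked)}
-- ===== Notes on version B (the rewrite author's own statement) =====
-- stated objective: alternative
-- what changed: B replaces A's interleaved membership-test-plus-counter loop by a rank-by-first-position algorithm: it sweeps the flat left/right key stream back to front so overwriting records each key's FIRST position, sorts the distinct keys by that position, and numbers them by enumeration.
import Mathlib
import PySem

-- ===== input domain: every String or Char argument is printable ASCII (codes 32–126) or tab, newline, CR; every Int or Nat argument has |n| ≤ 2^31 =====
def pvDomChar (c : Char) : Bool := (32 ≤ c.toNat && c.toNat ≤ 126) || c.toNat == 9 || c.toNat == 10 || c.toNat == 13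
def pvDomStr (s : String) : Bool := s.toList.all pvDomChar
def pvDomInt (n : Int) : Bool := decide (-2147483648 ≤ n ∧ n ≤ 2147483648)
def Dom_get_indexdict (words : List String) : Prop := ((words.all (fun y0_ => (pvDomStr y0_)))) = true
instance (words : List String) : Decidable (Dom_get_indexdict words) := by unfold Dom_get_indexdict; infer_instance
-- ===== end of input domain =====

-- B replaces A's membership-test-plus-counter loop by a different algorithm: a back-to-front
-- sweep recording each key's first position, then a sort of the distinct keys by that position
-- (alternative algorithm; same result, not claimed faster).

-- ===== PORT A =====
def pyLeft (word : String) : String := "<LEFT>" ++ word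

def pyRight (word : String) : String := "<RIGHT>" ++ word

def get_indexdict (words : List String) : List (String × Int) :=
  (words.foldl
    (fun (st : PySem.Dict String Int × Int) word =>
      let st := if st.1.contains (pyLeft word) then st
                else (st.1.insert (pyLeft word) st.2, st.2 + 1)
      if st.1.contains (pyRight word) then st
      else (st.1.insert (pyRight word) st.2, st.2 + 1))
    (PySem.Dict.empty, 0)).1.items

-- ===== PORT B =====
def get_indexdict_alt (words : List String) : List (String × Int) :=
  let flat := words.flatMap (fun word => [pyLeft word, pyRight word])
  -- for pos, key in reversed(list(enumerate(flat))): firstpos[key] = pos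
  let firstpos := ((PySem.List.enumerate flat 0).reverse).foldl
      (fun (d : PySem.Dict String Int) p => d.insert p.2 p.1) PySem.Dict.empty
  -- sorted(firstpos, key=lambda k: firstpos[k]); every k iterated is a key, so firstpos[k] = getD k 0
  let ranked := PySem.List.sorted firstpos.keys (fun k => firstpos.getD k 0) false
  (PySem.Dict.ofList ((PySem.List.enumerate ranked 0).map (fun p => (p.2, p.1)))).items

-- ===== PRECONDITION & SPEC =====
def Spec_get_indexdict (words : List String) (out : List (String × Int)) : Prop := out = get_indexdict_alt words
instance (words : List String) (out : List (String × Int)) : Decidable (Spec_get_indexdict words out) := by unfold Spec_get_indexdict; infer_instance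

-- ===== CLAIM (what is proved, stated in full; the proofs are below) =====
def Claim_equal_get_indexdict : Prop := ∀ (words : List String), Dom_get_indexdict words → Spec_get_indexdict words (get_indexdict words)

-- ===== LEMMAS AND PROOFS =====

-- the first-seen list of keys, as accumulated word by word
def pvSeen (words : List String) (s : List String) : List String :=
  words.foldl (fun s w => PySem.Set.add (PySem.Set.add s (pyLeft w)) (pyRight w)) s

-- the dict A maintains, reconstructed from its first-seen key list
def pvEnum (s : List String) : List (String × Int) :=
  (PySem.List.enumerate s 0).map (fun p => (p.2, p.1))

theorem pvEnum_fst (s : List String) : (pvEnum s).map Prod.fst = s := by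
  simp [pvEnum, Function.comp_def, PySem.List.map_snd_enumerate]

theorem pvEnum_append (s : List String) (k : String) :
    pvEnum (s ++ [k]) = pvEnum s ++ [(k, (s.length : Int))] := by
  simp [pvEnum, PySem.List.enumerate_append, PySem.List.enumerate_cons]

theorem pv_keys_enum (s : List String) : (PySem.Dict.mk (pvEnum s)).keys = s := by
  rw [PySem.Dict.keys_mk]; exact pvEnum_fst s

theorem pv_contains_enum (s : List String) (k : String) :
    (PySem.Dict.mk (pvEnum s)).contains k = decide (k ∈ s) := by
  have hiff := PySem.Dict.contains_iff_mem_keys (PySem.Dict.mk (pvEnum s)) k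
  rw [pv_keys_enum] at hiff
  by_cases h : k ∈ s
  · simp [h, hiff.mpr h]
  · cases hb : (PySem.Dict.mk (pvEnum s)).contains k with
    | false => simp [h]
    | true => exact absurd (hiff.mp hb) h

theorem pv_step (s : List String) (k : String) :
    (if (PySem.Dict.mk (pvEnum s)).contains k then (PySem.Dict.mk (pvEnum s), (s.length : Int))
     else ((PySem.Dict.mk (pvEnum s)).insert k (s.length : Int), (s.length : Int) + 1))
    = (PySem.Dict.mk (pvEnum (PySem.Set.add s k)), ((PySem.Set.add s k).length : Int)) := by
  rw [pv_contains_enum]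
  by_cases h : k ∈ s
  · have hadd : PySem.Set.add s k = s := by
      simp [PySem.Set.add, PySem.Set.contains, h]
    rw [hadd]; simp [h]
  · have hc : (PySem.Dict.mk (pvEnum s)).contains k = false := by
      rw [pv_contains_enum]; simp [h]
    have hadd : PySem.Set.add s k = s ++ [k] := by
      simp [PySem.Set.add, PySem.Set.contains, h]
    simp only [h, decide_false, Bool.false_eq_true, if_false, hadd]
    refine Prod.ext ?_ ?_
    · exact PySem.Dict.ext (by
        rw [PySem.Dict.items_insert_of_not_contains _ _ hc, pvEnum_append])
    · simp

theorem pv_A_inv (words : List String) (s : List String) :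
    words.foldl
      (fun (st : PySem.Dict String Int × Int) word =>
        let st := if st.1.contains (pyLeft word) then st
                  else (st.1.insert (pyLeft word) st.2, st.2 + 1)
        if st.1.contains (pyRight word) then st
        else (st.1.insert (pyRight word) st.2, st.2 + 1))
      (PySem.Dict.mk (pvEnum s), (s.length : Int))
    = (PySem.Dict.mk (pvEnum (pvSeen words s)), ((pvSeen words s).length : Int)) := by
  induction words generalizing s with
  | nil => simp [pvSeen]
  | cons w ws ih =>
    simp only [List.foldl_cons, pv_step]
    rw [ih]
    rfl

theorem pv_ofList_flat (words : List String) (s : List String) :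
    List.foldl PySem.Set.add s (words.flatMap (fun w => [pyLeft w, pyRight w]))
    = pvSeen words s := by
  induction words generalizing s with
  | nil => simp [pvSeen]
  | cons w ws ih =>
    rw [List.flatMap_cons, List.foldl_append, ih]
    rfl

theorem pv_seen_nodup (words : List String) (s : List String) (hs : s.Nodup) :
    (pvSeen words s).Nodup := by
  induction words generalizing s with
  | nil => exact hs
  | cons w ws ih =>
    exact ih _ (PySem.Set.nodup_add _ _ (PySem.Set.nodup_add _ _ hs))

-- dedup of the flat key stream IS pvSeen
theorem pv_dedup_flat (words : List String) :
    PySem.List.dedup (words.flatMap (fun w => [pyLeft w, pyRight w])) = pvSeen words [] := by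
  rw [PySem.List.dedup_eq_ofList, PySem.Set.ofList_eq_foldl, pv_ofList_flat]

-- get? of the back-to-front first-position fold = first index in the stream
theorem pv_firstpos_get? (l : List String) (s : Int) (d : PySem.Dict String Int) (k : String) :
    ((PySem.List.enumerate l s).foldr
        (fun (p : Int × String) (d : PySem.Dict String Int) => d.insert p.2 p.1) d).get? k
    = match PySem.List.index? l k with
      | some j => some (s + (j : Int))
      | none => d.get? k := by
  induction l generalizing s d with
  | nil => simp [PySem.List.enumerate_nil, PySem.List.index?]
  | cons x xs ih =>
    rw [PySem.List.enumerate_cons, List.foldr_cons]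
    by_cases h : k = x
    · subst h
      rw [PySem.Dict.get?_insert_self, PySem.List.index?_cons_self]
      simp
    · rw [PySem.Dict.get?_insert_of_ne _ _ h, ih,
          PySem.List.index?_cons_of_ne _ (fun he => h he.symm)]
      cases hj : PySem.List.index? xs k with
      | none => simp
      | some j => simp; ring

-- rank of a key in a list (first index, as Int); only used on members
def pvRank (xs : List String) (k : String) : Int :=
  ((PySem.List.index? xs k).getD 0 : Nat)

-- the dedup list is strictly increasing in first index
theorem pv_dedup_pairwise (xs : List String) :
    (PySem.List.dedup xs).Pairwise (fun a b => pvRank xs a < pvRank xs b) := by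
  induction xs using List.reverseRecOn with
  | nil => simp [PySem.List.dedup]
  | append_singleton xs x ih =>
    have hmemdd : ∀ a ∈ PySem.List.dedup xs, a ∈ xs := by
      intro a ha
      exact (PySem.List.mem_dedup _ _).mp ha
    have hrank_eq : ∀ a ∈ xs, pvRank (xs ++ [x]) a = pvRank xs a := by
      intro a ha
      unfold pvRank
      rw [PySem.List.index?_append_of_mem _ ha]
    by_cases hx : x ∈ xs
    · have : PySem.List.dedup (xs ++ [x]) = PySem.List.dedup xs := by
        rw [PySem.List.dedup_eq_ofList, PySem.List.dedup_eq_ofList,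
            PySem.Set.ofList_append_singleton, PySem.Set.add_of_mem]
        exact (PySem.Set.mem_ofList _ _).mpr hx
      rw [this]
      exact ih.imp_of_mem (fun {a b} ha hb hab => by
        rw [hrank_eq a (hmemdd a ha), hrank_eq b (hmemdd b hb)]; exact hab)
    · have hdd : PySem.List.dedup (xs ++ [x]) = PySem.List.dedup xs ++ [x] := by
        rw [PySem.List.dedup_eq_ofList, PySem.List.dedup_eq_ofList,
            PySem.Set.ofList_append_singleton, PySem.Set.add_of_not_mem]
        exact fun hm => hx ((PySem.Set.mem_ofList _ _).mp hm)
      rw [hdd, List.pairwise_append]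
      refine ⟨ih.imp_of_mem (fun {a b} ha hb hab => by
        rw [hrank_eq a (hmemdd a ha), hrank_eq b (hmemdd b hb)]; exact hab),
        List.pairwise_singleton _ _, ?_⟩
      intro a ha b hb
      rw [List.mem_singleton] at hb
      subst b
      rw [hrank_eq a (hmemdd a ha)]
      have hax : a ∈ xs := hmemdd a ha
      obtain ⟨j, hj⟩ := Option.isSome_iff_exists.mp ((PySem.List.index?_isSome_iff xs a).mpr hax)
      obtain ⟨hlt, -, -⟩ := PySem.List.getElem_of_index?_eq_some hj
      unfold pvRank
      rw [hj, PySem.List.index?_append_singleton_self _ _ hx]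
      simpa using hlt

-- the sort of the distinct keys by first position names the dedup order
theorem pv_ranked (flat : List String) :
    PySem.List.sorted
      (((PySem.List.enumerate flat 0).reverse).foldl
          (fun (d : PySem.Dict String Int) p => d.insert p.2 p.1) PySem.Dict.empty).keys
      (fun k => (((PySem.List.enumerate flat 0).reverse).foldl
          (fun (d : PySem.Dict String Int) p => d.insert p.2 p.1) PySem.Dict.empty).getD k 0)
      false
    = PySem.List.dedup flat := by
  have hfold : ((PySem.List.enumerate flat 0).reverse).foldl
      (fun (d : PySem.Dict String Int) p => d.insert p.2 p.1) PySem.Dict.empty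
      = (PySem.List.enumerate flat 0).foldr
          (fun (p : Int × String) (d : PySem.Dict String Int) => d.insert p.2 p.1)
          PySem.Dict.empty := by
    rw [List.foldl_reverse]
  have hget : ∀ k ∈ flat,
      (((PySem.List.enumerate flat 0).reverse).foldl
          (fun (d : PySem.Dict String Int) p => d.insert p.2 p.1) PySem.Dict.empty).getD k 0
      = pvRank flat k := by
    intro k hk
    obtain ⟨j, hj⟩ := Option.isSome_iff_exists.mp ((PySem.List.index?_isSome_iff flat k).mpr hk)
    rw [PySem.Dict.getD_eq_get?_getD, hfold, pv_firstpos_get?, hj]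
    unfold pvRank
    rw [hj]
    simp
  have hkeys : (((PySem.List.enumerate flat 0).reverse).foldl
      (fun (d : PySem.Dict String Int) p => d.insert p.2 p.1) PySem.Dict.empty).keys
      = PySem.Set.ofList flat.reverse := by
    rw [PySem.Dict.keys_foldl_insert_key _ (fun p : Int × String => p.2) (fun d p => p.1) _]
    rw [PySem.Dict.keys_empty, List.map_reverse, PySem.List.map_snd_enumerate,
        PySem.Set.update_nil_left]
  have hperm : (PySem.List.dedup flat).Perm
      (((PySem.List.enumerate flat 0).reverse).foldl
          (fun (d : PySem.Dict String Int) p => d.insert p.2 p.1) PySem.Dict.empty).keys := by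
    rw [hkeys]
    refine (List.perm_ext_iff_of_nodup ?_ ?_).mpr ?_
    · rw [PySem.List.dedup_eq_ofList]; exact PySem.Set.nodup_ofList _
    · exact PySem.Set.nodup_ofList _
    · intro a
      rw [PySem.List.mem_dedup, PySem.Set.mem_ofList, List.mem_reverse]
  have hpw : (PySem.List.dedup flat).Pairwise
      (fun a b => (((PySem.List.enumerate flat 0).reverse).foldl
          (fun (d : PySem.Dict String Int) p => d.insert p.2 p.1) PySem.Dict.empty).getD a 0
        < (((PySem.List.enumerate flat 0).reverse).foldl
          (fun (d : PySem.Dict String Int) p => d.insert p.2 p.1) PySem.Dict.empty).getD b 0) := by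
    exact (pv_dedup_pairwise flat).imp_of_mem (fun {a b} ha hb hab => by
      rw [hget a ((PySem.List.mem_dedup _ _).mp ha), hget b ((PySem.List.mem_dedup _ _).mp hb)]
      exact hab)
  exact PySem.List.sorted_eq_of_perm_of_pairwise_lt _ _ _ hperm hpw

-- rebuilding the result dict from the ranked key list
theorem pv_items_enum (s : List String) (hs : s.Nodup) :
    (PySem.Dict.ofList (pvEnum s)).items = pvEnum s := by
  have hfst : (List.map Prod.fst (pvEnum s)).Nodup := by
    rw [pvEnum_fst]; exact hs
  have hfold : PySem.Dict.ofList (pvEnum s)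
      = List.foldl (fun (d : PySem.Dict String Int) (p : String × Int) => d.insert p.1 p.2)
          PySem.Dict.empty (pvEnum s) := rfl
  rw [hfold, PySem.Dict.items_foldl_insert_fresh _ Prod.fst Prod.snd _
        (fun a _ => rfl) hfst]
  simp [PySem.Dict.empty]

theorem pv_alt_eq (words : List String) :
    get_indexdict_alt words = pvEnum (pvSeen words []) := by
  show (PySem.Dict.ofList ((PySem.List.enumerate
      (PySem.List.sorted _ _ false) 0).map (fun p => (p.2, p.1)))).items = _
  rw [pv_ranked, pv_dedup_flat]
  exact pv_items_enum _ (pv_seen_nodup words [] List.nodup_nil)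

-- ===== VERDICT (by name: the statement is the Claim_ definition above) =====
theorem get_indexdict_spec : Claim_equal_get_indexdict := by
  intro words _
  unfold Spec_get_indexdict get_indexdict
  rw [pv_alt_eq]
  rw [show ((PySem.Dict.empty : PySem.Dict String Int), (0 : Int))
        = (PySem.Dict.mk (pvEnum []), ((([] : List String)).length : Int)) from rfl]
  rw [pv_A_inv]
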